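-- pv_equiv track=rewrite | github.com/QueenOyster/DataStructure-Algorithms | 1 CodingTest/1 Codility/CounterDict.py | solution
-- ===== SOURCE A (Python) =====
-- def solution(A):
--     counter_dict = dict()
--
--     for item in A:
--         if item not in counter_dict.keys():
--             counter_dict[item] = 1
--         else:
--             counter_dict[item] += 1
--
--     for key in counter_dict:
--         if counter_dict[key] % 2 == 1:
--             return key
-- ===== SOURCE B (Python) =====
-- def solution(A):
--     # Brute force: no auxiliary counting structure at all.  For each element
--     # in order, count its occurrences in the whole list directly; the first
--     # element whose total count is odd is exactly the first-appearance key
--     # with odd count (implicitly None if there is none).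
--     for x in A:
--         if A.count(x) % 2 == 1:
--             return x
-- ===== Notes on version B (the rewrite author's own statement) =====
-- stated objective: simpler
-- what changed: Drops the counting dictionary entirely: B scans A and, for each element, counts its occurrences directly with list.count, returning the first element whose total count is odd (nested-scan brute force instead of hash counting plus a dict-key scan).
import Mathlib
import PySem

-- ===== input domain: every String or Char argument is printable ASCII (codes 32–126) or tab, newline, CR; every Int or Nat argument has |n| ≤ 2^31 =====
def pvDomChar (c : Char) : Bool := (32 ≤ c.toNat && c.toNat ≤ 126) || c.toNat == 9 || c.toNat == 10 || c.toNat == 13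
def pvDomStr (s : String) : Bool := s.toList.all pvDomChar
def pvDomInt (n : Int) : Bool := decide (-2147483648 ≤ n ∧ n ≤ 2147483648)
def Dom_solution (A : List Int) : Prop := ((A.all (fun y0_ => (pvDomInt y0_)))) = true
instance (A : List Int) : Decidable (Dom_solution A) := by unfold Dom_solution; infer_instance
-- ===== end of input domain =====

-- B drops A's counting dictionary: it scans A and counts each element's occurrences directly, returning the first with odd count (simpler, not faster: O(n^2) vs O(n)).

-- ===== PORT A =====
def solution (A : List Int) : Option Int :=
  let d : PySem.Dict Int Int := A.foldl (fun d item =>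
    if d.contains item = false then d.insert item 1
    else d.insert item (d.getD item 0 + 1)) PySem.Dict.empty
  -- 'counter_dict[key]' with key ∈ keys: getD 0 is exact here since the key is present
  d.keys.find? (fun key => PySem.Int.mod (d.getD key 0) 2 == 1)

-- ===== PORT B =====
def solution_alt (A : List Int) : Option Int :=
  A.find? (fun x => PySem.Int.mod ((PySem.List.count A x : Int)) 2 == 1)

-- ===== PRECONDITION & SPEC =====
def Spec_solution (A : List Int) (out : Option Int) : Prop := out = solution_alt A
instance (A : List Int) (out : Option Int) : Decidable (Spec_solution A out) := by unfold Spec_solution; infer_instance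

-- ===== CLAIM (what is proved, stated in full; the proofs are below) =====
def Claim_equal_solution : Prop := ∀ (A : List Int), Dom_solution A → Spec_solution A (solution A)

-- ===== LEMMAS AND PROOFS =====

-- A's loop body is always an insert of (previous count + 1)
lemma stepA_eq (d : PySem.Dict Int Int) (a : Int) :
    (if d.contains a = false then d.insert a 1 else d.insert a (d.getD a 0 + 1))
      = d.insert a (d.getD a 0 + 1) := by
  by_cases h : d.contains a = false
  · have h0 : d.getD a 0 = 0 := by
      simp [PySem.Dict.getD, PySem.Dict.contains_eq_isSome_get?] at h ⊢
      cases hg : d.get? a with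
      | none => simp
      | some v => simp [hg] at h
    simp [h, h0]
  · simp [h]

lemma foldA_eq (A : List Int) (d : PySem.Dict Int Int) :
    A.foldl (fun d item =>
      if d.contains item = false then d.insert item 1
      else d.insert item (d.getD item 0 + 1)) d
      = A.foldl (fun d item => d.insert item (d.getD item 0 + 1)) d := by
  congr 1
  funext d a
  exact stepA_eq d a

lemma dictA_getD (A : List Int) (d : PySem.Dict Int Int) (k : Int) :
    (A.foldl (fun d item =>
      if d.contains item = false then d.insert item 1
      else d.insert item (d.getD item 0 + 1)) d).getD k 0 = d.getD k 0 + A.count k := by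
  rw [foldA_eq, PySem.Dict.getD_foldl_insert_add_one]

lemma dictA_keys (A : List Int) :
    (A.foldl (fun d item =>
      if d.contains item = false then d.insert item 1
      else d.insert item (d.getD item 0 + 1)) (PySem.Dict.empty : PySem.Dict Int Int)).keys
      = PySem.Set.ofList A := by
  rw [foldA_eq, show (fun (d : PySem.Dict Int Int) item => d.insert item (d.getD item 0 + 1))
      = (fun (d : PySem.Dict Int Int) item => d.insert item ((fun (d : PySem.Dict Int Int) item => d.getD item 0 + 1) d item)) from rfl,
    PySem.Dict.keys_foldl_insert]
  simp [PySem.Set.update_nil_left]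

lemma find?_congr_mem {α : Type} (l : List α) (p q : α → Bool)
    (h : ∀ x ∈ l, p x = q x) : l.find? p = l.find? q := by
  induction l with
  | nil => rfl
  | cons a l ih =>
    simp only [List.find?_cons, h a (by simp)]
    cases q a <;> simp_all

-- find? over the first-appearance dedup of A equals find? over A itself
lemma find?_foldl_add {α : Type} [BEq α] [LawfulBEq α] (p : α → Bool) (A : List α) :
    ∀ s : PySem.Set α, (A.foldl PySem.Set.add s).find? p = (s.find? p).or (A.find? p) := by
  induction A with
  | nil => intro s; simp
  | cons a A ih =>
    intro s
    simp only [List.foldl_cons, ih, List.find?_cons]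
    by_cases hm : a ∈ s
    · rw [PySem.Set.add_of_mem hm]
      cases hp : p a
      · simp
      · obtain ⟨w, hw, hpw⟩ : ∃ w ∈ s, p w = true := ⟨a, hm, hp⟩
        have : s.find? p ≠ none := by
          simp only [ne_eq, List.find?_eq_none, not_forall]
          exact ⟨w, hw, by simp [hpw]⟩
        obtain ⟨v, hv⟩ := Option.ne_none_iff_exists'.mp this
        simp [hv]
    · rw [PySem.Set.add_of_not_mem hm, List.find?_append]
      cases hp : p a <;> simp [hp]

-- ===== VERDICT (by name: the statement is the Claim_ definition above) =====
theorem solution_spec : Claim_equal_solution := by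
  intro A _
  unfold Spec_solution solution solution_alt
  simp only [dictA_keys]
  rw [find?_congr_mem (PySem.Set.ofList A) _
       (fun x => PySem.Int.mod ((PySem.List.count A x : Int)) 2 == 1)
       (fun x _ => by rw [dictA_getD]; simp [PySem.List.count_eq])]
  rw [show PySem.Set.ofList A = A.foldl PySem.Set.add PySem.Set.empty from PySem.Set.ofList_eq_foldl A]
  rw [find?_foldl_add]
  simp [PySem.Set.empty, Option.or]
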